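-- pv_equiv track=rewrite | github.com/tornow-nadir/RaySession | src/shared/ray.py | isValidFullPath
-- ===== SOURCE A (Python) =====
-- def isValidFullPath(path: str)->bool:
--     if not path.startswith('/'):
--         return False
--
--     for forbidden in ('//', '/./', '/../'):
--         if forbidden in path:
--             return False
--
--     if path.endswith(('/.', '/..')):
--         return False
--     return True
-- ===== SOURCE B (Python) =====
-- def isValidFullPath(path: str) -> bool:
--     if not path.startswith('/'):
--         return False
--     segments = path.split('/')[1:]
--     last = len(segments) - 1
--     for i, seg in enumerate(segments):
--         if seg in ('.', '..'):
--             return False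
--         if seg == '' and i != last:
--             return False
--     return True
-- ===== Notes on version B (the rewrite author's own statement) =====
-- stated objective: idiomatic
-- what changed: B tokenizes the path with split('/') and validates each component ('.', '..', and non-final empty segments rejected), instead of A's scans for forbidden substrings and suffixes.
import Mathlib
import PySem

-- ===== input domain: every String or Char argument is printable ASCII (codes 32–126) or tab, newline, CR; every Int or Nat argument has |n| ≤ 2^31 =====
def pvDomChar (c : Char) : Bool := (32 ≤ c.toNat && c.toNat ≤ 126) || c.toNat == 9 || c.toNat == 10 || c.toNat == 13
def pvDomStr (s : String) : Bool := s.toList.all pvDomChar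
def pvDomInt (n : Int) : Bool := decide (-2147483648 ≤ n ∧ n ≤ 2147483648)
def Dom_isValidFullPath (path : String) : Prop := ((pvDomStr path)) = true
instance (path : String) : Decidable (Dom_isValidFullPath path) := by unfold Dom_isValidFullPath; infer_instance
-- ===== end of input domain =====

-- B validates by splitting the path into '/'-separated components and checking each component, instead of A's scan for forbidden substrings; objective: idiomatic, same return value.

-- ===== PORT A =====
def isValidFullPath (path : String) : Bool :=
  if !(PySem.Str.startswith path "/") then false
  else if PySem.Str.isIn "//" path then false
  else if PySem.Str.isIn "/./" path then false
  else if PySem.Str.isIn "/../" path then false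
  else if PySem.Str.endswith path "/." || PySem.Str.endswith path "/.." then false
  else true

-- ===== PORT B =====
-- the loop over segments[1:]: reject '.', '..', and an empty segment that is not the last
def altGo : List (List Char) → Bool
  | [] => true
  | seg :: rest =>
    if seg = ['.'] ∨ seg = ['.', '.'] then false
    else if seg = [] ∧ rest ≠ [] then false
    else altGo rest

def isValidFullPath_alt (path : String) : Bool :=
  if !(PySem.Str.startswith path "/") then false
  else altGo (List.splitOn '/' path.toList).tail

-- ===== PRECONDITION & SPEC =====
def Spec_isValidFullPath (path : String) (out : Bool) : Prop := out = isValidFullPath_alt path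
instance (path : String) (out : Bool) : Decidable (Spec_isValidFullPath path out) := by unfold Spec_isValidFullPath; infer_instance

-- ===== CLAIM (what is proved, stated in full; the proofs are below) =====
def Claim_equal_isValidFullPath : Prop := ∀ (path : String), Dom_isValidFullPath path → Spec_isValidFullPath path (isValidFullPath path)

-- ===== LEMMAS AND PROOFS =====

-- A's five forbidden-pattern conditions, on a path '/'::r
def lhsA (r : List Char) : Prop :=
  ¬ (['/', '/'] <:+: ('/' :: r)) ∧ ¬ (['/', '.', '/'] <:+: ('/' :: r)) ∧
  ¬ (['/', '.', '.', '/'] <:+: ('/' :: r)) ∧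
  ¬ (['/', '.'] <:+ ('/' :: r)) ∧ ¬ (['/', '.', '.'] <:+ ('/' :: r))

lemma slash_prefix_cons {q : List Char} {c : Char} {l : List Char} (hc : c ≠ '/') :
    ¬ ('/' :: q <+: c :: l) := by
  intro h
  exact hc ((List.cons_prefix_cons.mp h).1).symm

-- a pattern starting with '/' cannot start inside a slash-free run
lemma slash_infix_seg {q seg t : List Char} (hseg : ∀ c ∈ seg, c ≠ '/') :
    ('/' :: q <:+: seg ++ t) ↔ ('/' :: q <:+: t) := by
  induction seg with
  | nil => simp
  | cons c cs ih =>
    have hc : c ≠ '/' := hseg c (by simp)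
    rw [List.cons_append, List.infix_cons_iff]
    simp [slash_prefix_cons hc, ih (fun d hd => hseg d (by simp [hd]))]

lemma slash_suffix_seg {q seg t : List Char} (hseg : ∀ c ∈ seg, c ≠ '/') :
    ('/' :: q <:+ seg ++ t) ↔ ('/' :: q <:+ t) := by
  induction seg with
  | nil => simp
  | cons c cs ih =>
    have hc : c ≠ '/' := hseg c (by simp)
    have hne : '/' :: q ≠ c :: (cs ++ t) := by
      intro h; exact hc (by injection h with h1 _; exact h1.symm)
    rw [List.cons_append, List.suffix_cons_iff]
    simp [hne, ih (fun d hd => hseg d (by simp [hd]))]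

lemma splitOn_seg_single {seg : List Char} (hseg : ∀ c ∈ seg, c ≠ '/') :
    List.splitOn '/' seg = [seg] := by
  simp only [List.splitOn]
  exact List.splitOnP_eq_single _ _ (by intro x hx; simpa using hseg x hx)

lemma splitOn_seg_append {seg r2 : List Char} (hseg : ∀ c ∈ seg, c ≠ '/') :
    List.splitOn '/' (seg ++ '/' :: r2) = seg :: List.splitOn '/' r2 := by
  simp only [List.splitOn]
  exact List.splitOnP_first _ _ (by intro x hx; simpa using hseg x hx) _ (by simp) _

-- a path consisting of a single slash-free segment
lemma case_single {seg : List Char} (hseg : ∀ c ∈ seg, c ≠ '/') :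
    (altGo [seg] = true ↔ lhsA seg) := by
  have hnoin : ∀ q : List Char, '/' ∈ q → ¬ ('/' :: q <:+: ('/' :: seg)) := by
    intro q hq h
    rw [List.infix_cons_iff] at h
    rcases h with h | h
    · exact hseg '/' ((List.cons_prefix_cons.mp h).2.subset hq) rfl
    · rw [show seg = seg ++ ([] : List Char) by simp, slash_infix_seg hseg] at h
      simp at h
  have hnosuf : ∀ q : List Char, ('/' :: q <:+ ('/' :: seg)) ↔ seg = q := by
    intro q
    rw [List.suffix_cons_iff]
    constructor
    · rintro (h | h)
      · injection h with _ h; exact h.symm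
      · rw [show seg = seg ++ ([] : List Char) by simp, slash_suffix_seg hseg] at h
        simp at h
    · rintro rfl; left; rfl
  unfold lhsA
  simp [altGo, hnoin ['/'] (by simp), hnoin ['.', '/'] (by simp), hnoin ['.', '.', '/'] (by simp),
        hnosuf ['.'], hnosuf ['.', '.']]

lemma pre_slash {seg r2 : List Char} (hseg : ∀ c ∈ seg, c ≠ '/') :
    (['/'] <+: (seg ++ '/' :: r2)) ↔ seg = [] := by
  rcases seg with _ | ⟨a, s⟩
  · simp
  · have ha : a ≠ '/' := hseg a (by simp)
    simp [List.cons_prefix_cons, ha.symm]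

lemma pre_dot {seg r2 : List Char} (hseg : ∀ c ∈ seg, c ≠ '/') :
    (['.', '/'] <+: (seg ++ '/' :: r2)) ↔ seg = ['.'] := by
  rcases seg with _ | ⟨a, _ | ⟨b, s⟩⟩
  · simp [List.cons_prefix_cons]
  · simp [List.cons_prefix_cons, eq_comm]
  · have hb : b ≠ '/' := hseg b (by simp)
    simp [List.cons_prefix_cons, hb.symm]

lemma pre_dotdot {seg r2 : List Char} (hseg : ∀ c ∈ seg, c ≠ '/') :
    (['.', '.', '/'] <+: (seg ++ '/' :: r2)) ↔ seg = ['.', '.'] := by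
  rcases seg with _ | ⟨a, _ | ⟨b, _ | ⟨c, s⟩⟩⟩
  · simp [List.cons_prefix_cons]
  · simp [List.cons_prefix_cons]
  · simp [List.cons_prefix_cons, eq_comm]
  · have hc : c ≠ '/' := hseg c (by simp)
    simp [List.cons_prefix_cons, hc.symm]

-- peeling one slash-free segment plus its separating slash off the front
lemma case_step {seg r2 : List Char} (hseg : ∀ c ∈ seg, c ≠ '/') :
    lhsA (seg ++ '/' :: r2) ↔ (seg ≠ [] ∧ seg ≠ ['.'] ∧ seg ≠ ['.', '.']) ∧ lhsA r2 := by
  have hinf : ∀ q : List Char, (('/' :: q <:+: ('/' :: (seg ++ '/' :: r2))) ↔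
      ((q <+: seg ++ '/' :: r2) ∨ ('/' :: q <:+: ('/' :: r2)))) := by
    intro q
    rw [List.infix_cons_iff, List.cons_prefix_cons, slash_infix_seg hseg]
    simp
  have hsuf : ∀ q : List Char, '/' ∉ q → (('/' :: q <:+ ('/' :: (seg ++ '/' :: r2))) ↔
      ('/' :: q <:+ ('/' :: r2))) := by
    intro q hq
    rw [List.suffix_cons_iff]
    constructor
    · rintro (h | h)
      · exfalso; apply hq; injection h with _ h; rw [h]; simp
      · rw [slash_suffix_seg hseg] at h; exact h
    · intro h
      exact Or.inr ((slash_suffix_seg hseg).mpr h)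
  unfold lhsA
  rw [hinf ['/'], hinf ['.', '/'], hinf ['.', '.', '/'], hsuf ['.'] (by simp),
      hsuf ['.', '.'] (by simp), pre_slash hseg, pre_dot hseg, pre_dotdot hseg]
  tauto

lemma altGo_iff_lhsA : ∀ (n : Nat) (r : List Char), r.length ≤ n →
    (altGo (List.splitOn '/' r) = true ↔ lhsA r) := by
  intro n
  induction n with
  | zero =>
    intro r hr
    have : r = [] := List.length_eq_zero_iff.mp (Nat.le_zero.mp hr)
    subst this
    simp only [lhsA]
    decide
  | succ n ih =>
    intro r hr
    have hseg : ∀ c ∈ r.takeWhile (fun c => c ≠ '/'), c ≠ '/' := by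
      intro c hc
      simpa using List.mem_takeWhile_imp hc
    cases hd : r.dropWhile (fun c => decide (c ≠ '/')) with
    | nil =>
      have hr' : r = r.takeWhile (fun c => decide (c ≠ '/')) := by
        conv_lhs => rw [← List.takeWhile_append_dropWhile (p := fun c => decide (c ≠ '/')) (l := r)]
        rw [hd, List.append_nil]
      generalize hg : r.takeWhile (fun c => decide (c ≠ '/')) = seg at hseg hr'
      rw [hr', splitOn_seg_single hseg]
      exact case_single hseg
    | cons c r2 =>
      have hc : c = '/' := by
        have h := List.head?_dropWhile_not (fun c => decide (c ≠ '/')) r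
        rw [hd] at h
        simpa using h
      subst hc
      have hr' : r = r.takeWhile (fun c => decide (c ≠ '/')) ++ '/' :: r2 := by
        conv_lhs => rw [← List.takeWhile_append_dropWhile (p := fun c => decide (c ≠ '/')) (l := r)]
        rw [hd]
      generalize hg : r.takeWhile (fun c => decide (c ≠ '/')) = seg at hseg hr'
      have hlen : r2.length ≤ n := by
        have := congrArg List.length hr'
        simp at this
        omega
      have hiff := ih r2 hlen
      have hne : List.splitOn '/' r2 ≠ [] := by
        simp only [List.splitOn]
        exact List.splitOnP_ne_nil _ _
      rw [hr', splitOn_seg_append hseg, case_step hseg, ← hiff]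
      cases hbad : decide (seg = ['.'] ∨ seg = ['.', '.']) with
      | true =>
        have hb := of_decide_eq_true hbad
        simp [altGo, hb]
        rcases hb with h | h <;> simp [h]
      | false =>
        have hb := of_decide_eq_false hbad
        push Not at hb
        by_cases hnil : seg = []
        · subst hnil
          simp [altGo, hne]
        · simp [altGo, hb.1, hb.2, hnil, hne]

-- ===== VERDICT (by name: the statement is the Claim_ definition above) =====
theorem isValidFullPath_spec : Claim_equal_isValidFullPath := by
  intro path _
  unfold Spec_isValidFullPath
  cases hsw : PySem.Str.startswith path "/" with
  | false =>
    simp only [isValidFullPath, isValidFullPath_alt, hsw]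
    simp
  | true =>
    have hpre : ['/'] <+: path.toList := by
      rw [PySem.Str.startswith_eq] at hsw
      exact (PySem.Chars.startswith_iff _ _).mp hsw
    obtain ⟨r, hr⟩ : ∃ r, path.toList = '/' :: r := by
      obtain ⟨t, ht⟩ := hpre
      exact ⟨t, ht.symm⟩
    have htail : (List.splitOn '/' path.toList).tail = List.splitOn '/' r := by
      rw [hr]
      simp [List.splitOn, List.splitOnP_cons]
    have h1 : PySem.Str.isIn "//" path = decide (['/', '/'] <:+: ('/' :: r)) := by
      rw [Bool.eq_iff_iff, PySem.Str.isIn_iff_infix]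
      simp [hr]
    have h2 : PySem.Str.isIn "/./" path = decide (['/', '.', '/'] <:+: ('/' :: r)) := by
      rw [Bool.eq_iff_iff, PySem.Str.isIn_iff_infix]
      simp [hr]
    have h3 : PySem.Str.isIn "/../" path = decide (['/', '.', '.', '/'] <:+: ('/' :: r)) := by
      rw [Bool.eq_iff_iff, PySem.Str.isIn_iff_infix]
      simp [hr]
    have h4 : PySem.Str.endswith path "/." = decide (['/', '.'] <:+ ('/' :: r)) := by
      rw [Bool.eq_iff_iff, PySem.Str.endswith_eq]
      rw [PySem.Chars.endswith_iff]
      simp [hr]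
    have h5 : PySem.Str.endswith path "/.." = decide (['/', '.', '.'] <:+ ('/' :: r)) := by
      rw [Bool.eq_iff_iff, PySem.Str.endswith_eq]
      rw [PySem.Chars.endswith_iff]
      simp [hr]
    have hmain := altGo_iff_lhsA r.length r le_rfl
    unfold lhsA at hmain
    simp only [isValidFullPath, isValidFullPath_alt, hsw, h1, h2, h3, h4, h5, htail,
               Bool.not_true, Bool.false_eq_true, if_false]
    by_cases p1 : (['/', '/'] <:+: ('/' :: r)) <;>
      by_cases p2 : (['/', '.', '/'] <:+: ('/' :: r)) <;>
      by_cases p3 : (['/', '.', '.', '/'] <:+: ('/' :: r)) <;>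
      by_cases p4 : (['/', '.'] <:+ ('/' :: r)) <;>
      by_cases p5 : (['/', '.', '.'] <:+ ('/' :: r)) <;>
      simp [p1, p2, p3, p4, p5] at hmain ⊢ <;>
      simp [hmain]
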